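-- pv_equiv track=rewrite | github.com/vladislav-larionov/triangle_and_squre_graph_free | c3c4_free_graph_via_edge_removing.py | find_squares
-- ===== SOURCE A (Python) =====
-- def find_squares(g):
--     cycles = set()
--     n = len(g)
--     for a in range(0, n):
--         for b in range(0, n):
--             for c in range(0, n):
--                 for d in range(0, n):
--                     if g[a][b] and g[a][c] and g[c][d] and g[b][d]:
--                         if len({a, b, c, d}) == 4:
--                             cycles.add((a, b, c, d))
--     return cycles
-- ===== SOURCE B (Python) =====
-- def find_squares(g):
--     # Build successor (out-neighbor) lists and sets once, then enumerate only
--     # adjacent pairs instead of scanning all n^4 index tuples.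
--     n = len(g)
--     out = [[w for w in range(n) if g[v][w]] for v in range(n)]
--     outsets = [set(nbrs) for nbrs in out]
--     squares = set()
--     for a in range(n):
--         for b in out[a]:
--             for c in out[a]:
--                 csucc = outsets[c]
--                 for d in out[b]:
--                     if d in csucc and len({a, b, c, d}) == 4:
--                         squares.add((a, b, c, d))
--     return squares
-- ===== Notes on version B (the rewrite author's own statement) =====
-- stated objective: alternative
-- what changed: B precomputes per-vertex successor lists once and enumerates only adjacent pairs (b from out[a], c from out[a], d from out[b]) with a set-membership test for g[c][d], instead of A's blind scan over all n^4 index tuples.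
import Mathlib
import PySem

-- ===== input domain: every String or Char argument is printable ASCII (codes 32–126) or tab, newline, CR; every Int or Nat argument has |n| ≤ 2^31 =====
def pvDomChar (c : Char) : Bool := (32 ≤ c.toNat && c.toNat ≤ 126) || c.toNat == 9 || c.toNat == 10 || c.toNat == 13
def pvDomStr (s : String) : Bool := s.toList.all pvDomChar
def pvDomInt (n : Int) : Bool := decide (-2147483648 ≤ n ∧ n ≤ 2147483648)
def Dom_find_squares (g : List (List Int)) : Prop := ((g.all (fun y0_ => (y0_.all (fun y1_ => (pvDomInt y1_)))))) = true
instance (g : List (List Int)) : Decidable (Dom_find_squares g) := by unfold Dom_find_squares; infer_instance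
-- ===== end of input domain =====

-- B replaces A's scan of all n^4 index tuples by per-vertex successor lists and a
-- per-pair set-membership test (objective: alternative; return value is a set, and
-- both programs insert the quadruples in the same order).

-- shared indexing helper: g[i][j] (total form; Pre_ keeps every access in range)
def pvEntry (g : List (List Int)) (i j : Int) : Int :=
  PySem.List.pyGetD (PySem.List.pyGetD g i []) j 0

-- ===== PORT A =====
def find_squares (g : List (List Int)) : List (Int × Int × Int × Int) :=
  let n : Int := PySem.List.len g
  (PySem.List.pyRange 0 n 1).foldl (fun cycles a =>
    (PySem.List.pyRange 0 n 1).foldl (fun cycles b =>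
      (PySem.List.pyRange 0 n 1).foldl (fun cycles c =>
        (PySem.List.pyRange 0 n 1).foldl (fun cycles d =>
          if pvEntry g a b ≠ 0 ∧ pvEntry g a c ≠ 0 ∧ pvEntry g c d ≠ 0 ∧ pvEntry g b d ≠ 0 then
            if PySem.Set.len (PySem.Set.ofList [a, b, c, d]) = 4 then
              PySem.Set.add cycles (a, b, c, d)
            else cycles
          else cycles) cycles) cycles) cycles) PySem.Set.empty

-- ===== PORT B =====
def find_squares_alt (g : List (List Int)) : List (Int × Int × Int × Int) :=
  let n : Int := PySem.List.len g
  let out : List (List Int) :=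
    (PySem.List.pyRange 0 n 1).map (fun v =>
      (PySem.List.pyRange 0 n 1).filter (fun w => pvEntry g v w != 0))
  let outsets : List (PySem.Set Int) := out.map PySem.Set.ofList
  (PySem.List.pyRange 0 n 1).foldl (fun squares a =>
    (PySem.List.pyGetD out a []).foldl (fun squares b =>
      (PySem.List.pyGetD out a []).foldl (fun squares c =>
        let csucc := PySem.List.pyGetD outsets c PySem.Set.empty
        (PySem.List.pyGetD out b []).foldl (fun squares d =>
          if PySem.Set.contains csucc d ∧ PySem.Set.len (PySem.Set.ofList [a, b, c, d]) = 4 then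
            PySem.Set.add squares (a, b, c, d)
          else squares) squares) squares) squares) PySem.Set.empty

-- ===== PRECONDITION & SPEC =====
-- Python A evaluates g[a][b] for every a, b < len(g), so it raises IndexError exactly
-- when some row is shorter than len(g); Pre_ excludes exactly those inputs (B raises there too).
def Pre_find_squares (g : List (List Int)) : Prop :=
  ∀ row ∈ g, g.length ≤ row.length
instance (g : List (List Int)) : Decidable (Pre_find_squares g) := by unfold Pre_find_squares; infer_instance

def pvWitness_find_squares : List (List Int) := [[0, 1], [1, 0]]

def Spec_find_squares (g : List (List Int)) (out : List (Int × Int × Int × Int)) : Prop := out = find_squares_alt g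
instance (g : List (List Int)) (out : List (Int × Int × Int × Int)) : Decidable (Spec_find_squares g out) := by unfold Spec_find_squares; infer_instance

-- ===== CLAIM (what is proved, stated in full; the proofs are below) =====
def Claim_equal_find_squares : Prop := ∀ (g : List (List Int)), Dom_find_squares g → Pre_find_squares g → Spec_find_squares g (find_squares g)

-- ===== LEMMAS AND PROOFS =====

theorem pv_mem_csucc (g : List (List Int)) (v d : Int) :
    (PySem.Set.contains
        (PySem.Set.ofList ((PySem.List.pyRange 0 (PySem.List.len g) 1).filter
          (fun w => pvEntry g v w != 0))) d) = true ↔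
      (d ∈ PySem.List.pyRange 0 (PySem.List.len g) 1 ∧ pvEntry g v d ≠ 0) := by
  rw [show (PySem.Set.contains
        (PySem.Set.ofList ((PySem.List.pyRange 0 (PySem.List.len g) 1).filter
          (fun w => pvEntry g v w != 0))) d = true) ↔
      d ∈ PySem.Set.ofList ((PySem.List.pyRange 0 (PySem.List.len g) 1).filter
          (fun w => pvEntry g v w != 0)) from by
        simp [PySem.Set.contains]]
  rw [PySem.Set.mem_ofList]
  simp [List.mem_filter]

theorem find_squares_eq_alt (g : List (List Int)) :
    find_squares g = find_squares_alt g := by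
  unfold find_squares find_squares_alt
  simp only []
  set n : Int := PySem.List.len g with hn
  set R : List Int := PySem.List.pyRange 0 n 1 with hR
  have houtAt : ∀ v ∈ R,
      PySem.List.pyGetD
        (R.map (fun v => R.filter (fun w => pvEntry g v w != 0))) v []
        = R.filter (fun w => pvEntry g v w != 0) := by
    intro v hv
    rw [hR] at hv ⊢
    rcases PySem.List.mem_pyRange_one.mp hv with ⟨h0, h1⟩
    exact PySem.List.pyGetD_map_pyRange_of_nonneg _ n v [] h0 h1
  have houtSet : ∀ v ∈ R,
      PySem.List.pyGetD
        ((R.map (fun v => R.filter (fun w => pvEntry g v w != 0))).map PySem.Set.ofList)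
        v PySem.Set.empty
        = PySem.Set.ofList (R.filter (fun w => pvEntry g v w != 0)) := by
    intro v hv
    rw [hR] at hv ⊢
    rcases PySem.List.mem_pyRange_one.mp hv with ⟨h0, h1⟩
    rw [List.map_map]
    exact PySem.List.pyGetD_map_pyRange_of_nonneg _ n v PySem.Set.empty h0 h1
  apply PySem.List.foldl_congr_mem
  intro cy a ha
  -- rewrite out[a], out[b], out[c] to filters, then hoist B's filters into guards
  rw [houtAt a ha, List.foldl_filter]
  apply PySem.List.foldl_congr_mem
  intro cy b hb
  by_cases hab : pvEntry g a b ≠ 0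
  · simp only [hab, bne_iff_ne, ne_eq, not_false_eq_true, if_true]
    rw [List.foldl_filter]
    apply PySem.List.foldl_congr_mem
    intro cy c hc
    by_cases hac : pvEntry g a c ≠ 0
    · simp only [hac, bne_iff_ne, ne_eq, not_false_eq_true, if_true]
      have hbR : b ∈ R := hb
      rcases PySem.List.mem_pyRange_one.mp hbR with ⟨hb0, hb1⟩
      rw [show PySem.List.pyGetD
            (R.map (fun v => R.filter (fun w => pvEntry g v w != 0))) b []
            = R.filter (fun w => pvEntry g b w != 0) from houtAt b hb,
          List.foldl_filter, houtSet c hc]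
      apply PySem.List.foldl_congr_mem
      intro cy d hd
      by_cases hbd : pvEntry g b d ≠ 0
      · simp only [hbd, bne_iff_ne, ne_eq, not_false_eq_true, if_true]
        by_cases hcd : pvEntry g c d ≠ 0
        · have hmem : (PySem.Set.contains
              (PySem.Set.ofList (R.filter (fun w => pvEntry g c w != 0))) d) = true := by
            rw [hR]
            exact (pv_mem_csucc g c d).mpr ⟨by rw [← hR]; exact hd, hcd⟩
          simp [hcd, hd]
        · have hmem : ¬ (PySem.Set.contains
              (PySem.Set.ofList (R.filter (fun w => pvEntry g c w != 0))) d) = true := by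
            rw [hR]
            intro h
            exact hcd ((pv_mem_csucc g c d).mp h).2
          simp [hcd]
      · simp only [hbd, bne_iff_ne]
        simp
    · -- g[a][c] falsy: A's innermost loop never fires
      have hac0 : pvEntry g a c = 0 := not_not.mp hac
      simp [hac0]
  · -- g[a][b] falsy: A's two inner loops never fire
    have hab0 : pvEntry g a b = 0 := not_not.mp hab
    simp [hab0]

-- ===== VERDICT (by name: the statement is the Claim_ definition above) =====
theorem find_squares_spec : Claim_equal_find_squares := by
  intro g _ _
  unfold Spec_find_squares
  exact find_squares_eq_alt g
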